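-- pv_equiv track=rewrite | github.com/mbhatt1/threat | src/lambdas/report_generator/handler.py | _analyze_business_impact
-- ===== SOURCE A (Python) =====
-- from typing import Dict, List, Any
--
-- def _analyze_business_impact(findings: List[Dict[str, Any]]) -> Dict[str, int]:
--     """Analyze distribution of business impact"""
--     impact_dist = {
--         'critical_assets': 0,
--         'high_value_assets': 0,
--         'normal_assets': 0
--     }
--
--     for finding in findings:
--         criticality = finding.get('asset_criticality', 'normal')
--         if criticality == 'critical':
--             impact_dist['critical_assets'] += 1
--         elif criticality == 'high':
--             impact_dist['high_value_assets'] += 1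
--         else:
--             impact_dist['normal_assets'] += 1
--
--     return impact_dist
-- ===== SOURCE B (Python) =====
-- from itertools import groupby
-- from typing import Dict, List, Any
--
-- def _analyze_business_impact(findings: List[Dict[str, Any]]) -> Dict[str, int]:
--     """Analyze distribution of business impact (sort, then tally consecutive runs)."""
--     labels = {'critical': 'critical_assets', 'high': 'high_value_assets'}
--     impact = {'critical_assets': 0, 'high_value_assets': 0, 'normal_assets': 0}
--     keys = sorted(f.get('asset_criticality', 'normal') for f in findings)
--     for k, grp in groupby(keys):
--         impact[labels.get(k, 'normal_assets')] += sum(1 for _ in grp)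
--     return impact
-- ===== Notes on version B (the rewrite author's own statement) =====
-- stated objective: alternative
-- what changed: B sorts the raw criticality values and run-length-groups them with itertools.groupby, adding each whole group's length to its bucket via a label table, instead of A's per-element if/elif/else increments.
import Mathlib
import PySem

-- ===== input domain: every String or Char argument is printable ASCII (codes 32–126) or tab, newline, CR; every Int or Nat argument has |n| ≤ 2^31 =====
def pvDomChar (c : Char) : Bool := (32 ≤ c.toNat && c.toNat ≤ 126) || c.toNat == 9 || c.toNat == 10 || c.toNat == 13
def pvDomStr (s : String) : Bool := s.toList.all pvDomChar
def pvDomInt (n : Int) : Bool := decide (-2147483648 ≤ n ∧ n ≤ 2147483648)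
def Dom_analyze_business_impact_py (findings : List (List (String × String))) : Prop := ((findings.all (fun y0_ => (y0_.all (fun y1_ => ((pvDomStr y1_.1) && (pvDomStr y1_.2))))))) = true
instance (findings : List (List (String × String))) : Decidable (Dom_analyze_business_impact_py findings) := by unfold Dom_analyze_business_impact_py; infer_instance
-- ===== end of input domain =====

-- B sorts the criticality values and tallies them run by run with groupby via a label table (alternative algorithm); equivalence of return values.

-- ===== PORT A =====
-- finding.get('asset_criticality', 'normal') — shared input-reading primitive for both ports
def pvCrit (finding : List (String × String)) : String :=
  (PySem.Dict.mk finding).getD "asset_criticality" "normal"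

def analyze_business_impact_py (findings : List (List (String × String))) : List (String × Int) :=
  let impact_dist : PySem.Dict String Int :=
    ((PySem.Dict.empty.insert "critical_assets" 0).insert "high_value_assets" 0).insert "normal_assets" 0
  (findings.foldl (fun d finding =>
      let criticality := pvCrit finding
      if criticality = "critical" then d.modify "critical_assets" 0 (· + 1)
      else if criticality = "high" then d.modify "high_value_assets" 0 (· + 1)
      else d.modify "normal_assets" 0 (· + 1)) impact_dist).items

-- ===== PORT B =====
-- itertools.groupby over an iterator of strings: the list of (key, run length) for maximal consecutive runs
def pvGroupby : List String → List (String × Nat)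
  | [] => []
  | x :: xs => (x, (xs.takeWhile (· == x)).length + 1) :: pvGroupby (xs.dropWhile (· == x))
termination_by l => l.length
decreasing_by
  simp only [List.length_cons]
  exact Nat.lt_succ_of_le (List.length_dropWhile_le _ _)

def analyze_business_impact_py_alt (findings : List (List (String × String))) : List (String × Int) :=
  let labels : PySem.Dict String String :=
    PySem.Dict.mk [("critical", "critical_assets"), ("high", "high_value_assets")]
  let impact : PySem.Dict String Int :=
    PySem.Dict.mk [("critical_assets", 0), ("high_value_assets", 0), ("normal_assets", 0)]
  let keys := PySem.List.sorted (findings.map pvCrit) (fun x => x) false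
  ((pvGroupby keys).foldl (fun d g =>
      d.modify (labels.getD g.1 "normal_assets") 0 (· + (g.2 : Int))) impact).items

-- ===== PRECONDITION & SPEC =====
def Spec_analyze_business_impact_py (findings : List (List (String × String))) (out : List (String × Int)) : Prop := out = analyze_business_impact_py_alt findings
instance (findings : List (List (String × String))) (out : List (String × Int)) : Decidable (Spec_analyze_business_impact_py findings out) := by unfold Spec_analyze_business_impact_py; infer_instance

-- ===== CLAIM (what is proved, stated in full; the proofs are below) =====
def Claim_equal_analyze_business_impact_py : Prop := ∀ (findings : List (List (String × String))), Dom_analyze_business_impact_py findings → Spec_analyze_business_impact_py findings (analyze_business_impact_py findings)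

-- ===== LEMMAS AND PROOFS =====

def pvInit3 (a b c : Int) : PySem.Dict String Int :=
  PySem.Dict.mk [("critical_assets", a), ("high_value_assets", b), ("normal_assets", c)]

lemma pvInit3_eq : ((PySem.Dict.empty.insert "critical_assets" (0:Int)).insert "high_value_assets" 0).insert "normal_assets" 0 = pvInit3 0 0 0 := by
  decide

lemma pvModify_crit (a b c m : Int) :
    (pvInit3 a b c).modify "critical_assets" 0 (· + m) = pvInit3 (a + m) b c := by
  simp [pvInit3, PySem.Dict.modify, PySem.Dict.getD, PySem.Dict.get?, PySem.Dict.insert, PySem.Dict.contains]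

lemma pvModify_high (a b c m : Int) :
    (pvInit3 a b c).modify "high_value_assets" 0 (· + m) = pvInit3 a (b + m) c := by
  simp [pvInit3, PySem.Dict.modify, PySem.Dict.getD, PySem.Dict.get?, PySem.Dict.insert, PySem.Dict.contains]

lemma pvModify_norm (a b c m : Int) :
    (pvInit3 a b c).modify "normal_assets" 0 (· + m) = pvInit3 a b (c + m) := by
  simp [pvInit3, PySem.Dict.modify, PySem.Dict.getD, PySem.Dict.get?, PySem.Dict.insert, PySem.Dict.contains]

-- the labels.get(k, 'normal_assets') lookup, case-analysed
lemma pvLabel_eq (k : String) :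
    (PySem.Dict.mk [("critical", "critical_assets"), ("high", "high_value_assets")]).getD k "normal_assets"
      = if k = "critical" then "critical_assets" else if k = "high" then "high_value_assets" else "normal_assets" := by
  by_cases h1 : k = "critical" <;> by_cases h2 : k = "high"
  · simp [h1] at h2
  · have c1 : ("critical" == k) = true := by simp [h1]
    simp [PySem.Dict.getD, PySem.Dict.get?, List.find?, h1]
  · simp [PySem.Dict.getD, PySem.Dict.get?, List.find?, h2]
  · have c1 : ("critical" == k) = false := by simp; exact fun h => h1 h.symm
    have c2 : ("high" == k) = false := by simp; exact fun h => h2 h.symm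
    simp [PySem.Dict.getD, PySem.Dict.get?, List.find?, c1, c2, h1, h2]

-- A's loop, closed form
lemma pvLoopA (l : List (List (String × String))) (a b c : Int) :
    l.foldl (fun d finding =>
      let criticality := pvCrit finding
      if criticality = "critical" then d.modify "critical_assets" 0 (· + 1)
      else if criticality = "high" then d.modify "high_value_assets" 0 (· + 1)
      else d.modify "normal_assets" 0 (· + 1)) (pvInit3 a b c)
    = pvInit3 (a + ((l.map pvCrit).count "critical" : Int))
              (b + ((l.map pvCrit).count "high" : Int))
              (c + (((l.map pvCrit).countP (fun s => !(s == "critical") && !(s == "high"))) : Int)) := by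
  induction l generalizing a b c with
  | nil => simp [pvInit3]
  | cons x xs ih =>
    simp only [List.foldl_cons, List.map_cons]
    by_cases h1 : pvCrit x = "critical"
    · simp [h1, pvModify_crit, ih]; ring_nf
    · by_cases h2 : pvCrit x = "high"
      · simp [h2, pvModify_high, ih]; ring_nf
      · simp [h1, h2, pvModify_norm, ih]; ring_nf

-- every element of a run equals its key
lemma pvRun_all (x : String) (xs : List String) : ∀ v ∈ xs.takeWhile (· == x), v = x := by
  intro v hv
  simpa using List.mem_takeWhile_imp hv

-- counting splits over the run decomposition
lemma pvRun_count (x : String) (xs : List String) (v : String) :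
    xs.count v = (xs.takeWhile (· == x)).count v + (xs.dropWhile (· == x)).count v := by
  conv_lhs => rw [← List.takeWhile_append_dropWhile (p := (· == x)) (l := xs)]
  rw [List.count_append]

lemma pvRun_countP (x : String) (xs : List String) (p : String → Bool) :
    xs.countP p = (xs.takeWhile (· == x)).countP p + (xs.dropWhile (· == x)).countP p := by
  conv_lhs => rw [← List.takeWhile_append_dropWhile (p := (· == x)) (l := xs)]
  rw [List.countP_append]

lemma pvRunCount (x v : String) (xs : List String) :
    (xs.takeWhile (· == x)).count v = if x = v then (xs.takeWhile (· == x)).length else 0 := by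
  split_ifs with h
  · subst h
    rw [List.count_eq_length]
    intro b hb
    exact (pvRun_all x xs b hb).symm
  · rw [List.count_eq_zero]
    intro hv
    exact h ((pvRun_all x xs v hv).symm)

lemma pvRunCountP (x : String) (xs : List String) :
    (xs.takeWhile (· == x)).countP (fun s => !(s == "critical") && !(s == "high"))
      = if x = "critical" ∨ x = "high" then 0 else (xs.takeWhile (· == x)).length := by
  split_ifs with h
  · rw [List.countP_eq_zero]
    intro v hv
    have hv' := pvRun_all x xs v hv
    subst hv'
    rcases h with h | h <;> simp [h]
  · rw [List.countP_eq_length]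
    intro v hv
    have hv' := pvRun_all x xs v hv
    subst hv'
    rw [not_or] at h
    simp [h.1, h.2]

-- B's loop over the runs, closed form: every run of value k adds its length to bucket(k)
lemma pvLoopB (l : List String) (a b c : Int) :
    (pvGroupby l).foldl (fun d g =>
        d.modify ((PySem.Dict.mk [("critical", "critical_assets"), ("high", "high_value_assets")]).getD g.1 "normal_assets") 0 (· + (g.2 : Int))) (pvInit3 a b c)
    = pvInit3 (a + (l.count "critical" : Int)) (b + (l.count "high" : Int))
              (c + ((l.countP (fun s => !(s == "critical") && !(s == "high"))) : Int)) := by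
  induction l using pvGroupby.induct generalizing a b c with
  | case1 => simp [pvGroupby, pvInit3]
  | case2 x xs ih =>
    rw [pvGroupby]
    simp only [List.foldl_cons]
    by_cases h1 : x = "critical"
    · subst h1
      have hk : (PySem.Dict.mk [("critical", "critical_assets"), ("high", "high_value_assets")]).getD "critical" "normal_assets" = "critical_assets" := by decide
      rw [hk, pvModify_crit, ih]
      have hc := pvRun_count "critical" xs "critical"
      have hh := pvRun_count "critical" xs "high"
      have hp := pvRun_countP "critical" xs (fun s => !(s == "critical") && !(s == "high"))
      have hrc : (xs.takeWhile (· == "critical")).count "critical" = (xs.takeWhile (· == "critical")).length := by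
        rw [pvRunCount]; simp
      have hrh : (xs.takeWhile (· == "critical")).count "high" = 0 := by
        rw [pvRunCount]; simp
      have hrp : (xs.takeWhile (· == "critical")).countP (fun s => !(s == "critical") && !(s == "high")) = 0 := by
        rw [pvRunCountP]; simp
      have e1 : (("critical" :: xs).count "critical") = xs.count "critical" + 1 := by simp
      have e2 : (("critical" :: xs).count "high") = xs.count "high" := by simp
      have e3 : (("critical" :: xs).countP (fun s => !(s == "critical") && !(s == "high"))) = xs.countP (fun s => !(s == "critical") && !(s == "high")) := by simp
      congr 1 <;> omega
    · by_cases h2 : x = "high"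
      · subst h2
        have hk : (PySem.Dict.mk [("critical", "critical_assets"), ("high", "high_value_assets")]).getD "high" "normal_assets" = "high_value_assets" := by decide
        rw [hk, pvModify_high, ih]
        have hc := pvRun_count "high" xs "critical"
        have hh := pvRun_count "high" xs "high"
        have hp := pvRun_countP "high" xs (fun s => !(s == "critical") && !(s == "high"))
        have hrc : (xs.takeWhile (· == "high")).count "critical" = 0 := by
          rw [pvRunCount]; simp
        have hrh : (xs.takeWhile (· == "high")).count "high" = (xs.takeWhile (· == "high")).length := by
          rw [pvRunCount]; simp
        have hrp : (xs.takeWhile (· == "high")).countP (fun s => !(s == "critical") && !(s == "high")) = 0 := by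
          rw [pvRunCountP]; simp
        have e1 : (("high" :: xs).count "critical") = xs.count "critical" := by simp
        have e2 : (("high" :: xs).count "high") = xs.count "high" + 1 := by simp
        have e3 : (("high" :: xs).countP (fun s => !(s == "critical") && !(s == "high"))) = xs.countP (fun s => !(s == "critical") && !(s == "high")) := by simp
        congr 1 <;> omega
      · have hk : (PySem.Dict.mk [("critical", "critical_assets"), ("high", "high_value_assets")]).getD x "normal_assets" = "normal_assets" := by
          rw [pvLabel_eq, if_neg h1, if_neg h2]
        rw [hk, pvModify_norm, ih]
        have hc := pvRun_count x xs "critical"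
        have hh := pvRun_count x xs "high"
        have hp := pvRun_countP x xs (fun s => !(s == "critical") && !(s == "high"))
        have hrc : (xs.takeWhile (· == x)).count "critical" = 0 := by
          rw [pvRunCount, if_neg h1]
        have hrh : (xs.takeWhile (· == x)).count "high" = 0 := by
          rw [pvRunCount, if_neg h2]
        have hrp : (xs.takeWhile (· == x)).countP (fun s => !(s == "critical") && !(s == "high")) = (xs.takeWhile (· == x)).length := by
          rw [pvRunCountP, if_neg (not_or.mpr ⟨h1, h2⟩)]
        have e1 : ((x :: xs).count "critical") = xs.count "critical" := by simp [h1]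
        have e2 : ((x :: xs).count "high") = xs.count "high" := by simp [h2]
        have e3 : ((x :: xs).countP (fun s => !(s == "critical") && !(s == "high"))) = xs.countP (fun s => !(s == "critical") && !(s == "high")) + 1 := by
          simp [h1, h2]
        congr 1 <;> omega

-- ===== VERDICT (by name: the statement is the Claim_ definition above) =====
theorem analyze_business_impact_py_spec : Claim_equal_analyze_business_impact_py := by
  intro findings _
  unfold Spec_analyze_business_impact_py
  simp only [analyze_business_impact_py, analyze_business_impact_py_alt]
  have hA :
      (findings.foldl (fun d finding =>
        let criticality := pvCrit finding
        if criticality = "critical" then d.modify "critical_assets" 0 (· + 1)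
        else if criticality = "high" then d.modify "high_value_assets" 0 (· + 1)
        else d.modify "normal_assets" 0 (· + 1))
        (((PySem.Dict.empty.insert "critical_assets" (0:Int)).insert "high_value_assets" 0).insert "normal_assets" 0))
      = pvInit3 (0 + ((findings.map pvCrit).count "critical" : Int))
                (0 + ((findings.map pvCrit).count "high" : Int))
                (0 + (((findings.map pvCrit).countP (fun s => !(s == "critical") && !(s == "high"))) : Int)) := by
    rw [pvInit3_eq]; exact pvLoopA findings 0 0 0
  have hB :
      ((pvGroupby (PySem.List.sorted (findings.map pvCrit) (fun x => x) false)).foldl (fun d g =>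
        d.modify ((PySem.Dict.mk [("critical", "critical_assets"), ("high", "high_value_assets")]).getD g.1 "normal_assets") 0 (· + (g.2 : Int)))
        (PySem.Dict.mk [("critical_assets", (0:Int)), ("high_value_assets", 0), ("normal_assets", 0)]))
      = pvInit3 (0 + ((PySem.List.sorted (findings.map pvCrit) (fun x => x) false).count "critical" : Int))
                (0 + ((PySem.List.sorted (findings.map pvCrit) (fun x => x) false).count "high" : Int))
                (0 + (((PySem.List.sorted (findings.map pvCrit) (fun x => x) false).countP (fun s => !(s == "critical") && !(s == "high"))) : Int)) :=
    pvLoopB (PySem.List.sorted (findings.map pvCrit) (fun x => x) false) 0 0 0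
  have hperm : (PySem.List.sorted (findings.map pvCrit) (fun x => x) false).Perm (findings.map pvCrit) :=
    PySem.List.sorted_perm _ _ _
  rw [hA, hB, hperm.count_eq, hperm.count_eq, hperm.countP_eq]
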